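-- pv_equiv track=rewrite | github.com/Jeonghoonchoi74/Kakao-X-Goorm-AI-Practice | Task28.py | calculate_shots
-- ===== SOURCE A (Python) =====
-- def calculate_shots(n, healths):
--     total_shots = 0
--     damage_index = 0
--
--     for i in range(n):
--         enemy_health = healths[i]
--
--         while enemy_health > 0:
--             damage = (damage_index % 4) + 1
--             enemy_health -= damage
--             damage_index += 1
--             total_shots += 1
--
--     return total_shots
-- ===== SOURCE B (Python) =====
-- # KTAB[p][r]: number of shots needed to deal r+1 damage (r in 0..9) when the
-- # cyclic 1-2-3-4 gun is currently at phase p (next damage is p+1).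
-- KTAB = [
--     [1, 2, 2, 3, 3, 3, 4, 4, 4, 4],  # phase 0: damages 1,2,3,4 -> prefix sums 1,3,6,10
--     [1, 1, 2, 2, 2, 3, 3, 3, 3, 4],  # phase 1: damages 2,3,4,1 -> prefix sums 2,5,9,10
--     [1, 1, 1, 2, 2, 2, 2, 3, 4, 4],  # phase 2: damages 3,4,1,2 -> prefix sums 3,7,8,10
--     [1, 1, 1, 1, 2, 3, 3, 4, 4, 4],  # phase 3: damages 4,1,2,3 -> prefix sums 4,5,7,10
-- ]
--
-- def calculate_shots(n, healths):
--     total = 0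
--     phase = 0  # damage index modulo 4
--     for i in range(n):
--         h = healths[i]
--         if h > 0:
--             q, r = divmod(h - 1, 10)   # q full 10-damage cycles, then r+1 damage left
--             k = KTAB[phase][r]
--             total += 4 * q + k
--             phase = (phase + k) % 4
--     return total
-- ===== Notes on version B (the rewrite author's own statement) =====
-- stated objective: faster
-- what changed: Replaces the shot-by-shot inner while loop with O(1) per-enemy arithmetic: full 10-damage cycles by divmod and the remainder via a precomputed 4x10 phase/remainder shot table.
import Mathlib
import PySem

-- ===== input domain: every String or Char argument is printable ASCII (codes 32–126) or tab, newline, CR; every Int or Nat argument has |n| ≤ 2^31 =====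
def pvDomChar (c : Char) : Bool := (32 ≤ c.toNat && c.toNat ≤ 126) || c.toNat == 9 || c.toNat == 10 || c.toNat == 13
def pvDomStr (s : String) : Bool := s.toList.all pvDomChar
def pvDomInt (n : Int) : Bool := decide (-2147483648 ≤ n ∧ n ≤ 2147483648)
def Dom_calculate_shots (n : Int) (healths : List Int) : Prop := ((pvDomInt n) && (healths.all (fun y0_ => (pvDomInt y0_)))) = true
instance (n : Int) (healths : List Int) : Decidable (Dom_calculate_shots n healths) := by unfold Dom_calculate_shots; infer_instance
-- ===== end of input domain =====

-- B replaces A's shot-by-shot inner while loop with O(1) per-enemy arithmetic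
-- (divmod for full 10-damage cycles + a precomputed 4x10 phase/remainder shot table);
-- equivalence of the return value is proved on all inputs where A does not raise.

-- ===== PORT A =====
-- inner 'while enemy_health > 0' loop of A; state (damage_index, total_shots)
def shoot (h di ts : Int) : Int × Int :=
  if hh : 0 < h then
    shoot (h - (PySem.Int.mod di 4 + 1)) (di + 1) (ts + 1)
  else (di, ts)
termination_by h.toNat
decreasing_by
  have h1 : 0 ≤ PySem.Int.mod di 4 := PySem.Int.mod_nonneg di (by norm_num)
  omega

def calculate_shots (n : Int) (healths : List Int) : Int :=
  (List.foldl
    (fun (st : Int × Int) (i : Int) =>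
      shoot (PySem.List.pyGetD healths i 0) st.1 st.2)
    ((0 : Int), (0 : Int)) (PySem.List.pyRange 0 n 1)).2

-- ===== PORT B =====
-- KTAB of Source B: KTAB[p][r] = shots needed to deal r+1 damage starting at phase p
def ktab : List (List Int) :=
  [[1, 2, 2, 3, 3, 3, 4, 4, 4, 4],
   [1, 1, 2, 2, 2, 3, 3, 3, 3, 4],
   [1, 1, 1, 2, 2, 2, 2, 3, 4, 4],
   [1, 1, 1, 1, 2, 3, 3, 4, 4, 4]]

-- KTAB[p][r] lookup
def klook (p r : Int) : Int :=
  PySem.List.pyGetD (PySem.List.pyGetD ktab p []) r 0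

def calculate_shots_alt (n : Int) (healths : List Int) : Int :=
  (List.foldl
    (fun (st : Int × Int) (i : Int) =>
      let h := PySem.List.pyGetD healths i 0
      if 0 < h then
        let q := PySem.Int.floordiv (h - 1) 10
        let r := PySem.Int.mod (h - 1) 10
        let k := klook st.2 r
        (st.1 + 4 * q + k, PySem.Int.mod (st.2 + k) 4)
      else st)
    ((0 : Int), (0 : Int)) (PySem.List.pyRange 0 n 1)).1

-- ===== PRECONDITION & SPEC =====
-- Pre_ excludes exactly the inputs where Python A raises IndexError: healths[i] with n exceeding len(healths)
def Pre_calculate_shots (n : Int) (healths : List Int) : Prop := n ≤ (healths.length : Int)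
instance (n : Int) (healths : List Int) : Decidable (Pre_calculate_shots n healths) := by
  unfold Pre_calculate_shots; infer_instance
def pvWitness_calculate_shots : Int × List Int := (2, [5, 7])

def Spec_calculate_shots (n : Int) (healths : List Int) (out : Int) : Prop := out = calculate_shots_alt n healths
instance (n : Int) (healths : List Int) (out : Int) : Decidable (Spec_calculate_shots n healths out) := by unfold Spec_calculate_shots; infer_instance

-- ===== CLAIM (what is proved, stated in full; the proofs are below) =====
def Claim_equal_calculate_shots : Prop := ∀ (n : Int) (healths : List Int), Dom_calculate_shots n healths → Pre_calculate_shots n healths → Spec_calculate_shots n healths (calculate_shots n healths)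

-- ===== LEMMAS AND PROOFS =====

-- shots B charges an enemy of health h at phase p (Int.ediv/emod form of B's step)
def S (p h : Int) : Int :=
  if 0 < h then 4 * ((h - 1) / 10) + klook p ((h - 1) % 10) else 0

lemma klook0 (r : Int) (h0 : 0 ≤ r) (h9 : r < 10) :
    klook 0 r = if r < 1 then 1 else if r < 3 then 2 else if r < 6 then 3 else 4 := by
  interval_cases r <;> decide

lemma klook1 (r : Int) (h0 : 0 ≤ r) (h9 : r < 10) :
    klook 1 r = if r < 2 then 1 else if r < 5 then 2 else if r < 9 then 3 else 4 := by
  interval_cases r <;> decide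

lemma klook2 (r : Int) (h0 : 0 ≤ r) (h9 : r < 10) :
    klook 2 r = if r < 3 then 1 else if r < 7 then 2 else if r < 8 then 3 else 4 := by
  interval_cases r <;> decide

lemma klook3 (r : Int) (h0 : 0 ≤ r) (h9 : r < 10) :
    klook 3 r = if r < 4 then 1 else if r < 5 then 2 else if r < 7 then 3 else 4 := by
  interval_cases r <;> decide

lemma klook_ge_one (p r : Int) (hp0 : 0 ≤ p) (hp : p < 4) (h0 : 0 ≤ r) (h9 : r < 10) :
    1 ≤ klook p r := by
  interval_cases p <;> interval_cases r <;> decide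

lemma S_nonneg (p h : Int) (hp0 : 0 ≤ p) (hp : p < 4) : 0 ≤ S p h := by
  unfold S
  split
  · rename_i hh
    have hk := klook_ge_one p ((h - 1) % 10) hp0 hp (by omega) (by omega)
    omega
  · omega

lemma S_step (p h : Int) (hp0 : 0 ≤ p) (hp : p < 4) (hh : 0 < h) :
    S p h = 1 + S ((p + 1) % 4) (h - (p + 1)) := by
  have hr0 : 0 ≤ (h - 1) % 10 := by omega
  have hr9 : (h - 1) % 10 < 10 := by omega
  interval_cases p
  · rw [show ((0 : Int) + 1) % 4 = 1 by decide]
    simp only [S, if_pos hh]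
    rw [klook0 ((h - 1) % 10) hr0 hr9]
    by_cases h2 : 0 < h - (0 + 1)
    · rw [if_pos h2, klook1 ((h - (0 + 1) - 1) % 10) (by omega) (by omega)]
      split_ifs <;> omega
    · rw [if_neg h2]
      split_ifs <;> omega
  · rw [show ((1 : Int) + 1) % 4 = 2 by decide]
    simp only [S, if_pos hh]
    rw [klook1 ((h - 1) % 10) hr0 hr9]
    by_cases h2 : 0 < h - (1 + 1)
    · rw [if_pos h2, klook2 ((h - (1 + 1) - 1) % 10) (by omega) (by omega)]
      split_ifs <;> omega
    · rw [if_neg h2]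
      split_ifs <;> omega
  · rw [show ((2 : Int) + 1) % 4 = 3 by decide]
    simp only [S, if_pos hh]
    rw [klook2 ((h - 1) % 10) hr0 hr9]
    by_cases h2 : 0 < h - (2 + 1)
    · rw [if_pos h2, klook3 ((h - (2 + 1) - 1) % 10) (by omega) (by omega)]
      split_ifs <;> omega
    · rw [if_neg h2]
      split_ifs <;> omega
  · rw [show ((3 : Int) + 1) % 4 = 0 by decide]
    simp only [S, if_pos hh]
    rw [klook3 ((h - 1) % 10) hr0 hr9]
    by_cases h2 : 0 < h - (3 + 1)
    · rw [if_pos h2, klook0 ((h - (3 + 1) - 1) % 10) (by omega) (by omega)]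
      split_ifs <;> omega
    · rw [if_neg h2]
      split_ifs <;> omega

-- the inner while loop computed in closed form
lemma shoot_eq (fuel : Nat) : ∀ (h di ts : Int), h.toNat ≤ fuel → 0 ≤ di →
    shoot h di ts = (di + S (di % 4) h, ts + S (di % 4) h) := by
  induction fuel with
  | zero =>
    intro h di ts hf hdi
    have hh : ¬ 0 < h := by omega
    rw [shoot, dif_neg hh]
    simp [S, hh]
  | succ m ih =>
    intro h di ts hf hdi
    by_cases hh : 0 < h
    · rw [shoot, dif_pos hh]
      have hm : PySem.Int.mod di 4 = di % 4 := PySem.Int.mod_eq_emod_of_pos (by norm_num)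
      rw [hm]
      rw [ih (h - (di % 4 + 1)) (di + 1) (ts + 1) (by omega) (by omega)]
      have hs := S_step (di % 4) h (by omega) (by omega) hh
      have he : (di + 1) % 4 = (di % 4 + 1) % 4 := by omega
      rw [he, hs, Prod.mk.injEq]
      exact ⟨by ring, by ring⟩
    · rw [shoot, dif_neg hh]
      simp [S, hh]

lemma fold_rel (healths : List Int) (l : List Int) : ∀ (di ts tot ph : Int),
    0 ≤ di → ts = tot → ph = di % 4 →
    (List.foldl
      (fun (st : Int × Int) (i : Int) =>
        shoot (PySem.List.pyGetD healths i 0) st.1 st.2) (di, ts) l).2 =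
    (List.foldl
      (fun (st : Int × Int) (i : Int) =>
        let h := PySem.List.pyGetD healths i 0
        if 0 < h then
          let q := PySem.Int.floordiv (h - 1) 10
          let r := PySem.Int.mod (h - 1) 10
          let k := klook st.2 r
          (st.1 + 4 * q + k, PySem.Int.mod (st.2 + k) 4)
        else st) (tot, ph) l).1 := by
  induction l with
  | nil =>
    intro di ts tot ph hdi hts hph
    simpa using hts
  | cons x l ih =>
    intro di ts tot ph hdi hts hph
    simp only [List.foldl_cons]
    rw [shoot_eq (PySem.List.pyGetD healths x 0).toNat (PySem.List.pyGetD healths x 0) di ts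
      (le_refl _) hdi]
    by_cases hpos : 0 < PySem.List.pyGetD healths x 0
    · rw [if_pos hpos]
      have hfd : PySem.Int.floordiv (PySem.List.pyGetD healths x 0 - 1) 10 =
          (PySem.List.pyGetD healths x 0 - 1) / 10 :=
        PySem.Int.floordiv_eq_ediv_of_pos (by norm_num)
      have hmd : PySem.Int.mod (PySem.List.pyGetD healths x 0 - 1) 10 =
          (PySem.List.pyGetD healths x 0 - 1) % 10 :=
        PySem.Int.mod_eq_emod_of_pos (by norm_num)
      have hm4 : ∀ z : Int, PySem.Int.mod z 4 = z % 4 := fun z =>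
        PySem.Int.mod_eq_emod_of_pos (by norm_num)
      rw [hfd, hmd, hm4]
      have hS : S (di % 4) (PySem.List.pyGetD healths x 0) =
          4 * ((PySem.List.pyGetD healths x 0 - 1) / 10) +
            klook (di % 4) ((PySem.List.pyGetD healths x 0 - 1) % 10) := by
        rw [S, if_pos hpos]
      apply ih
      · have := S_nonneg (di % 4) (PySem.List.pyGetD healths x 0) (by omega) (by omega)
        omega
      · rw [hS, hph, hts]; ring
      · rw [hS, hph]
        have hk : klook (di % 4) ((PySem.List.pyGetD healths x 0 - 1) % 10) =
            klook (di % 4) ((PySem.List.pyGetD healths x 0 - 1) % 10) := rfl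
        omega
    · rw [if_neg hpos]
      have hS : S (di % 4) (PySem.List.pyGetD healths x 0) = 0 := by
        rw [S, if_neg hpos]
      rw [hS, add_zero, add_zero]
      exact ih di ts tot ph hdi hts hph

-- ===== VERDICT (by name: the statement is the Claim_ definition above) =====
theorem calculate_shots_spec : Claim_equal_calculate_shots := by
  intro n healths _hdom _hpre
  unfold Spec_calculate_shots calculate_shots calculate_shots_alt
  exact fold_rel healths (PySem.List.pyRange 0 n 1) 0 0 0 0 (by omega) rfl (by decide)
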